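-- pv_equiv track=rewrite | github.com/posl/comment_recommendation | script/mod_gen/1_time/zh/238_D/2.py | solve
-- ===== SOURCE A (Python) =====
-- def solve(a,s):
--     if a > s:
--         return False
--     if a == s:
--         return True
--     if a & 1 == 1:
--         if s & 1 == 1:
--             return True
--         else:
--             return False
--     else:
--         if s & 1 == 1:
--             return False
--         else:
--             return solve(a>>1,s>>1)
-- ===== SOURCE B (Python) =====
-- def solve(a, s):
--     # True iff a <= s and a, s have the same lowest set bit (same 2-adic valuation).
--     return a <= s and (a & -a) == (s & -s)
-- ===== Notes on version B (the rewrite author's own statement) =====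
-- stated objective: simpler
-- what changed: Replaces A's recursion that halves both even numbers with a single closed-form test: a <= s and equal lowest set bit (a & -a) == (s & -s).
import Mathlib
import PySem

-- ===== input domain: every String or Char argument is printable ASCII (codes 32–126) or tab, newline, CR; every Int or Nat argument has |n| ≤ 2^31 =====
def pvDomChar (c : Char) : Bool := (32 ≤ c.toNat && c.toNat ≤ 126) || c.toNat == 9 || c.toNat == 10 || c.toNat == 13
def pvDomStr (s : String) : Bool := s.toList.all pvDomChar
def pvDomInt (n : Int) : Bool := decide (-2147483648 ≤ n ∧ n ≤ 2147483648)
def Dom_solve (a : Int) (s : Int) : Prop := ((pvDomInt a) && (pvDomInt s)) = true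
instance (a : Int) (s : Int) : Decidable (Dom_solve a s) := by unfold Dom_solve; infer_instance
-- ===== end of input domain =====

-- B replaces A's halving recursion by one closed-form test (a ≤ s and equal lowest set bit); objective: simpler.

-- ===== PORT A =====
def solve (a : Int) (s : Int) : Bool :=
  if a > s then false
  else if a = s then true
  else if PySem.Int.band a 1 = 1 then
    if PySem.Int.band s 1 = 1 then true else false
  else
    if PySem.Int.band s 1 = 1 then false
    else solve (a >>> (1:Nat)) (s >>> (1:Nat))
termination_by a.natAbs + s.natAbs
decreasing_by
  rename_i h1 h2 h3 h4
  have ha : PySem.Int.mod a 2 = 0 := by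
    have := PySem.Int.mod_nonneg a (b := 2) (by norm_num)
    have := PySem.Int.mod_lt a (b := 2) (by norm_num)
    have hb := PySem.Int.band_one a
    omega
  have hs : PySem.Int.mod s 2 = 0 := by
    have := PySem.Int.mod_nonneg s (b := 2) (by norm_num)
    have := PySem.Int.mod_lt s (b := 2) (by norm_num)
    have hb := PySem.Int.band_one s
    omega
  obtain ⟨x, hx⟩ := (PySem.Int.mod_eq_zero_iff_dvd a 2).mp ha
  obtain ⟨y, hy⟩ := (PySem.Int.mod_eq_zero_iff_dvd s 2).mp hs
  have hxa : a >>> (1:Nat) = x := by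
    rw [Int.shiftRight_eq_div_pow]; omega
  have hys : s >>> (1:Nat) = y := by
    rw [Int.shiftRight_eq_div_pow]; omega
  rw [hxa, hys]
  omega

-- ===== PORT B =====
def solve_alt (a : Int) (s : Int) : Bool :=
  decide (a ≤ s) && (PySem.Int.band a (-a) == PySem.Int.band s (-s))

-- ===== PRECONDITION & SPEC =====
def Spec_solve (a : Int) (s : Int) (out : Bool) : Prop := out = solve_alt a s
instance (a : Int) (s : Int) (out : Bool) : Decidable (Spec_solve a s out) := by unfold Spec_solve; infer_instance

-- ===== CLAIM (what is proved, stated in full; the proofs are below) =====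
def Claim_equal_solve : Prop := ∀ (a : Int) (s : Int), Dom_solve a s → Spec_solve a s (solve a s)

-- ===== LEMMAS AND PROOFS =====

-- lowest set bit of a nonnegative number, the classic n - (n & (n-1)) form
def natLowbit (n : Nat) : Nat := n - (n &&& (n - 1))

theorem natLowbit_odd (n : Nat) (h : n % 2 = 1) : natLowbit n = 1 := by
  obtain ⟨k, hk⟩ : ∃ k, n = 2 * k + 1 := ⟨n / 2, by omega⟩
  subst hk
  have hand : (2 * k + 1) &&& (2 * k + 1 - 1) = 2 * k := by
    apply Nat.eq_of_testBit_eq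
    intro i
    cases i with
    | zero =>
        rw [Nat.testBit_land]
        simp [Nat.testBit_zero]
    | succ i =>
        have h1 : (2 * k + 1) / 2 = k := by omega
        have h2 : (2 * k + 1 - 1) / 2 = k := by omega
        have h3 : (2 * k) / 2 = k := by omega
        rw [Nat.testBit_land, Nat.testBit_succ, Nat.testBit_succ, Nat.testBit_succ, h1, h2, h3,
          Bool.and_self]
  unfold natLowbit
  omega

theorem natLowbit_even (k : Nat) : natLowbit (2 * k) = 2 * natLowbit k := by
  rcases Nat.eq_zero_or_pos k with hk | hk
  · subst hk; rfl
  have hand : (2 * k) &&& (2 * k - 1) = 2 * (k &&& (k - 1)) := by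
    apply Nat.eq_of_testBit_eq
    intro i
    cases i with
    | zero =>
        rw [Nat.testBit_land]
        simp [Nat.testBit_zero]
    | succ i =>
        have h1 : (2 * k) / 2 = k := by omega
        have h2 : (2 * k - 1) / 2 = k - 1 := by omega
        have h3 : (2 * (k &&& (k - 1))) / 2 = k &&& (k - 1) := by omega
        rw [Nat.testBit_land, Nat.testBit_succ, Nat.testBit_succ, Nat.testBit_succ, h1, h2, h3,
          Nat.testBit_land]
  have hle : k &&& (k - 1) ≤ k := Nat.and_le_left
  unfold natLowbit
  omega

theorem natLowbit_even_ne_one (n : Nat) (h : n % 2 = 0) : natLowbit n ≠ 1 := by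
  obtain ⟨k, hk⟩ : ∃ k, n = 2 * k := ⟨n / 2, by omega⟩
  subst hk
  rw [natLowbit_even]
  omega

-- Python's a & -a computed from |a|
theorem lowbit_eq (a : Int) : PySem.Int.band a (-a) = (natLowbit a.natAbs : Int) := by
  unfold PySem.Int.band natLowbit
  split_ifs with h1 h2 h2
  · -- 0 ≤ a and 0 ≤ -a : a = 0
    have : a = 0 := by omega
    subst this; rfl
  · -- a > 0
    have e1 : (-(-a) - 1).toNat = a.toNat - 1 := by omega
    have e2 : a.natAbs = a.toNat := by omega
    rw [e1, e2]
  · -- a < 0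
    have e1 : (-a - 1).toNat = (-a).toNat - 1 := by omega
    have e2 : a.natAbs = (-a).toNat := by omega
    rw [e1, e2]
  · omega

theorem band_one_cases (a : Int) : PySem.Int.band a 1 = 1 ∨ PySem.Int.band a 1 = 0 := by
  have := PySem.Int.mod_nonneg a (b := 2) (by norm_num)
  have := PySem.Int.mod_lt a (b := 2) (by norm_num)
  have hb := PySem.Int.band_one a
  omega

-- a % 2 as a statement about |a|
theorem band_one_natAbs (a : Int) : PySem.Int.band a 1 = (a.natAbs % 2 : Nat) := by
  have hb := PySem.Int.band_one a
  have he := PySem.Int.mod_eq_emod_of_pos (a := a) (b := 2) (by norm_num)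
  omega

theorem solve_alt_unfold (a s : Int) :
    solve_alt a s = (decide (a ≤ s) && decide (natLowbit a.natAbs = natLowbit s.natAbs)) := by
  unfold solve_alt
  rw [lowbit_eq, lowbit_eq]
  rcases Decidable.em (natLowbit a.natAbs = natLowbit s.natAbs) with h | h
  · simp [h]
  · simp [h]

theorem solve_eq_alt (a s : Int) : solve a s = solve_alt a s := by
  fun_induction solve a s with
  | case1 a s h =>
      rw [solve_alt_unfold]
      simp; omega
  | case2 a h =>
      rw [solve_alt_unfold]
      simp
  | case3 a s h he ha hs =>
      rw [solve_alt_unfold]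
      have ha' := band_one_natAbs a
      have hs' := band_one_natAbs s
      have h1 : natLowbit a.natAbs = 1 := natLowbit_odd _ (by omega)
      have h2 : natLowbit s.natAbs = 1 := natLowbit_odd _ (by omega)
      simp [h1, h2]; omega
  | case4 a s h he ha hs =>
      rw [solve_alt_unfold]
      have ha' := band_one_natAbs a
      have hs' := band_one_natAbs s
      rcases band_one_cases s with h' | h'
      · exact absurd h' hs
      have h1 : natLowbit a.natAbs = 1 := natLowbit_odd _ (by omega)
      have h2 : natLowbit s.natAbs ≠ 1 := natLowbit_even_ne_one _ (by omega)
      simp [h1]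
      intro _; omega
  | case5 a s h he ha hs =>
      rw [solve_alt_unfold]
      have ha' := band_one_natAbs a
      have hs' := band_one_natAbs s
      rcases band_one_cases a with h' | h'
      · exact absurd h' ha
      have h1 : natLowbit s.natAbs = 1 := natLowbit_odd _ (by omega)
      have h2 : natLowbit a.natAbs ≠ 1 := natLowbit_even_ne_one _ (by omega)
      simp [h1]
      intro _; omega
  | case6 a s h he ha hs ih =>
      have ha' := band_one_natAbs a
      have hs' := band_one_natAbs s
      rcases band_one_cases a with h' | h'
      · exact absurd h' ha
      rcases band_one_cases s with h'' | h''
      · exact absurd h'' hs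
      obtain ⟨x, hx⟩ : ∃ x, a = 2 * x := ⟨a / 2, by omega⟩
      obtain ⟨y, hy⟩ : ∃ y, s = 2 * y := ⟨s / 2, by omega⟩
      have hxa : a >>> (1:Nat) = x := by rw [Int.shiftRight_eq_div_pow]; omega
      have hys : s >>> (1:Nat) = y := by rw [Int.shiftRight_eq_div_pow]; omega
      rw [hxa, hys] at ih ⊢
      rw [ih, solve_alt_unfold, solve_alt_unfold]
      have e1 : a.natAbs = 2 * x.natAbs := by omega
      have e2 : s.natAbs = 2 * y.natAbs := by omega
      rw [e1, e2, natLowbit_even, natLowbit_even]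
      have d1 : decide (x ≤ y) = decide (a ≤ s) := decide_eq_decide.mpr (by omega)
      have d2 : decide (natLowbit x.natAbs = natLowbit y.natAbs)
          = decide (2 * natLowbit x.natAbs = 2 * natLowbit y.natAbs) :=
        decide_eq_decide.mpr (by omega)
      rw [d1, d2]

-- ===== VERDICT (by name: the statement is the Claim_ definition above) =====
theorem solve_spec : Claim_equal_solve := by
  intro a s _
  unfold Spec_solve
  exact solve_eq_alt a s
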